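-- pv_equiv track=rewrite | github.com/lautisilber/LifeSimulator | RobertoBiomeGenerator.py | GetDiamondAroundOrigin
-- ===== SOURCE A (Python) =====
-- def GetDiamondAroundOrigin(origin, radius):
--     if radius == 0:
--         return [origin]
--     coords = [
--         (origin[0] + radius, origin[1]),
--         (origin[0], origin[1] + radius),
--         (origin[0] - radius, origin[1]),
--         (origin[0], origin[1] - radius)
--     ]
--     d = 0
--     while True:
--         d += 1
--         newCoord = (coords[0][0] - d, coords[0][1] + d)
--         if not (newCoord in coords):
--             coords.append(newCoord)
--         else:
--             break
--     d = 0
--     while True: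
--         d += 1
--         newCoord = (coords[1][0] - d, coords[1][1] - d)
--         if not (newCoord in coords):
--             coords.append(newCoord)
--         else:
--             break
--     d = 0
--     while True:
--         d += 1
--         newCoord = (coords[2][0] + d, coords[2][1] - d)
--         if not (newCoord in coords):
--             coords.append(newCoord)
--         else:
--             break
--     d = 0
--     while True:
--         d += 1
--         newCoord = (coords[3][0] + d, coords[3][1] + d)
--         if not (newCoord in coords):
--             coords.append(newCoord)
--         else:
--             break
--     return coords
-- ===== SOURCE B (Python) =====
-- def GetDiamondAroundOrigin(origin, radius):
--     if radius == 0: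
--         return [origin]
--     x, y = origin[0], origin[1]
--     coords = [
--         (x + radius, y),
--         (x, y + radius),
--         (x - radius, y),
--         (x, y - radius)
--     ]
--     coords += [(x + radius - d, y + d) for d in range(1, radius)]
--     coords += [(x - d, y + radius - d) for d in range(1, radius)]
--     coords += [(x - radius + d, y - d) for d in range(1, radius)]
--     coords += [(x + d, y - radius + d) for d in range(1, radius)]
--     return coords
-- ===== Notes on version B (the rewrite author's own statement) =====
-- stated objective: simpler
-- what changed: B computes each edge's interior with a counted range(1, radius) loop derived from the radius, eliminating A's unbounded while-loops that detect each edge's end by a membership test against the growing coordinate list.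
import Mathlib
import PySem

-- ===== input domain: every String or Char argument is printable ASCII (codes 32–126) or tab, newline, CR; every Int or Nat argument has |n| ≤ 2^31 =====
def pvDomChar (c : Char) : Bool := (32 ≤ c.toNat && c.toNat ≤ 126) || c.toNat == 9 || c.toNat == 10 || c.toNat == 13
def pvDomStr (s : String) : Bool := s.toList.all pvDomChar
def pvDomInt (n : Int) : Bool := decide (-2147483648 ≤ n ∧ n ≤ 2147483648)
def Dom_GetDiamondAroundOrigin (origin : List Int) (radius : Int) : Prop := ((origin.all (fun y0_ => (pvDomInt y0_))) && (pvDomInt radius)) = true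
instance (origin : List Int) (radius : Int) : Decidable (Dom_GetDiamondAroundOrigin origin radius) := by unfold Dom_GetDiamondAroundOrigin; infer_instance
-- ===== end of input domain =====

-- B replaces A's unbounded membership-test while-loops by counted range(1, radius) loops
-- per diamond edge (return-value equivalence; neither mutates its arguments observably).

-- ===== PORT A =====
-- One of A's `while True` append-until-member loops: anchor index ai, per-step offsets
-- (sx, sy).  Fuel only makes the recursion total; within Pre_ the membership break fires
-- at d = radius, before the fuel (radius.toNat + 1) runs out, so the fuel branch is never
-- the result.
def pyWhileA (ai : Nat) (sx sy : Int) : Nat → Int → List (List Int) → List (List Int)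
  | 0, _, coords => coords
  | fuel + 1, d, coords =>
    let d' := d + 1
    let anchor := coords.getD ai []
    let newCoord := [anchor.getD 0 0 + sx * d', anchor.getD 1 0 + sy * d']
    if newCoord ∈ coords then coords
    else pyWhileA ai sx sy fuel d' (coords ++ [newCoord])

def GetDiamondAroundOrigin (origin : List Int) (radius : Int) : List (List Int) :=
  if radius = 0 then [origin]
  else
    -- origin[0], origin[1]: Pre_ guarantees origin has length ≥ 2 here, so getD is exact
    let x := origin.getD 0 0
    let y := origin.getD 1 0
    let coords := [[x + radius, y], [x, y + radius], [x - radius, y], [x, y - radius]]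
    let fuel := radius.toNat + 1
    let coords := pyWhileA 0 (-1) 1 fuel 0 coords
    let coords := pyWhileA 1 (-1) (-1) fuel 0 coords
    let coords := pyWhileA 2 1 (-1) fuel 0 coords
    let coords := pyWhileA 3 1 1 fuel 0 coords
    coords

-- ===== PORT B =====
def GetDiamondAroundOrigin_alt (origin : List Int) (radius : Int) : List (List Int) :=
  if radius = 0 then [origin]
  else
    let x := origin.getD 0 0
    let y := origin.getD 1 0
    let coords := [[x + radius, y], [x, y + radius], [x - radius, y], [x, y - radius]]
    let coords := coords ++ (PySem.List.pyRange 1 radius 1).map (fun d => [x + radius - d, y + d])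
    let coords := coords ++ (PySem.List.pyRange 1 radius 1).map (fun d => [x - d, y + radius - d])
    let coords := coords ++ (PySem.List.pyRange 1 radius 1).map (fun d => [x - radius + d, y - d])
    let coords := coords ++ (PySem.List.pyRange 1 radius 1).map (fun d => [x + d, y - radius + d])
    coords

-- ===== PRECONDITION & SPEC =====
-- Pre_ excludes radius < 0 (A's first while-loop never meets its break condition and
-- diverges) and radius ≠ 0 with origin shorter than 2 (origin[1] raises IndexError).
def Pre_GetDiamondAroundOrigin (origin : List Int) (radius : Int) : Prop :=
  radius = 0 ∨ (0 < radius ∧ 2 ≤ origin.length)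
instance (origin : List Int) (radius : Int) : Decidable (Pre_GetDiamondAroundOrigin origin radius) := by unfold Pre_GetDiamondAroundOrigin; infer_instance

def pvWitness_GetDiamondAroundOrigin : List Int × Int := ([0, 0], 2)

def Spec_GetDiamondAroundOrigin (origin : List Int) (radius : Int) (out : List (List Int)) : Prop := out = GetDiamondAroundOrigin_alt origin radius
instance (origin : List Int) (radius : Int) (out : List (List Int)) : Decidable (Spec_GetDiamondAroundOrigin origin radius out) := by unfold Spec_GetDiamondAroundOrigin; infer_instance

-- ===== CLAIM (what is proved, stated in full; the proofs are below) =====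
def Claim_equal_GetDiamondAroundOrigin : Prop := ∀ (origin : List Int) (radius : Int), Dom_GetDiamondAroundOrigin origin radius → Pre_GetDiamondAroundOrigin origin radius → Spec_GetDiamondAroundOrigin origin radius (GetDiamondAroundOrigin origin radius)

-- ===== LEMMAS AND PROOFS =====

-- The segment of interior points generated by offsets from step d0+1 onward.
def pvSeg (f : Int → List Int) (d0 : Int) (k : Nat) : List (List Int) :=
  (List.range k).map (fun (i : Nat) => f (d0 + 1 + (i : Int)))

lemma pvSeg_succ (f : Int → List Int) (d0 : Int) (k : Nat) :
    pvSeg f d0 (k + 1) = f (d0 + 1) :: pvSeg f (d0 + 1) k := by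
  unfold pvSeg
  rw [List.range_succ_eq_map, List.map_cons, List.map_map]
  simp only [Nat.cast_zero, add_zero]
  refine congrArg _ (List.map_congr_left fun i _ => ?_)
  simp only [Function.comp_apply]
  congr 1
  push_cast
  ring

-- Simulation of one of A's while-loops: if the generated point is fresh for the first k
-- steps and hits the list at step k+1, the loop returns the list extended by exactly
-- those k points.
lemma pyWhileA_spec (f : Int → List Int) (ax ay sx sy : Int) (ai : Nat)
    (hf : ∀ d : Int, f d = [ax + sx * d, ay + sy * d]) :
    ∀ (k : Nat) (coords : List (List Int)) (d0 : Int) (fuel : Nat),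
      ai < coords.length →
      (coords.getD ai []).getD 0 0 = ax →
      (coords.getD ai []).getD 1 0 = ay →
      k < fuel →
      (∀ j : Nat, j < k → f (d0 + 1 + j) ∉ coords ++ pvSeg f d0 j) →
      f (d0 + 1 + k) ∈ coords ++ pvSeg f d0 k →
      pyWhileA ai sx sy fuel d0 coords = coords ++ pvSeg f d0 k := by
  intro k
  induction k with
  | zero =>
    intro coords d0 fuel hai hax hay hfuel _ hstop
    obtain ⟨fuel, rfl⟩ : ∃ m, fuel = m + 1 := ⟨fuel - 1, by omega⟩
    simp only [pyWhileA]
    rw [if_pos]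
    · simp [pvSeg]
    · have : ([(coords.getD ai []).getD 0 0 + sx * (d0 + 1),
               (coords.getD ai []).getD 1 0 + sy * (d0 + 1)] : List Int)
             = f (d0 + 1) := by rw [hf, hax, hay]
      rw [this]
      simpa [pvSeg] using hstop
  | succ k ih =>
    intro coords d0 fuel hai hax hay hfuel hfresh hstop
    obtain ⟨fuel, rfl⟩ : ∃ m, fuel = m + 1 := ⟨fuel - 1, by omega⟩
    simp only [pyWhileA]
    have hnew : ([(coords.getD ai []).getD 0 0 + sx * (d0 + 1),
                  (coords.getD ai []).getD 1 0 + sy * (d0 + 1)] : List Int)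
                = f (d0 + 1) := by rw [hf, hax, hay]
    rw [hnew, if_neg (by simpa [pvSeg] using hfresh 0 (Nat.succ_pos k))]
    have hgetD : (coords ++ [f (d0 + 1)]).getD ai [] = coords.getD ai [] :=
      List.getD_append _ _ _ _ hai
    have hcons : ∀ (j : Nat), coords ++ [f (d0 + 1)] ++ pvSeg f (d0 + 1) j
        = coords ++ pvSeg f d0 (j + 1) := by
      intro j
      rw [pvSeg_succ]
      simp
    rw [ih (coords ++ [f (d0 + 1)]) (d0 + 1) fuel
        (by rw [List.length_append]; omega)
        (by rw [hgetD]; exact hax) (by rw [hgetD]; exact hay)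
        (by omega)
        (by intro j hj
            rw [hcons]
            have harg : d0 + 1 + 1 + (j : Int) = d0 + 1 + ((j + 1 : Nat) : Int) := by
              push_cast; ring
            rw [harg]
            exact hfresh (j + 1) (by omega))
        (by rw [hcons]
            have harg : d0 + 1 + 1 + (k : Int) = d0 + 1 + ((k + 1 : Nat) : Int) := by
              push_cast; ring
            rw [harg]
            exact hstop)]
    rw [hcons]

lemma pvSeg_eq_pyRange_map (g : Int → List Int) (r : Int) (_hr : 0 < r) :
    (PySem.List.pyRange 1 r 1).map g = pvSeg g 0 (r - 1).toNat := by
  rw [PySem.List.pyRange_one, List.map_map]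
  unfold pvSeg
  refine List.map_congr_left ?_
  intro i _
  simp only [Function.comp_apply]
  norm_num

-- ===== VERDICT (by name: the statement is the Claim_ definition above) =====
theorem GetDiamondAroundOrigin_spec : Claim_equal_GetDiamondAroundOrigin := by
  intro origin radius _ hpre
  unfold Spec_GetDiamondAroundOrigin GetDiamondAroundOrigin GetDiamondAroundOrigin_alt
  rcases hpre with h0 | ⟨hr, _⟩
  · simp [h0]
  have hne : radius ≠ 0 := by omega
  rw [if_neg hne, if_neg hne]
  set x := origin.getD 0 0
  set y := origin.getD 1 0
  clear_value x y
  obtain ⟨r, rfl⟩ : ∃ r, r = radius := ⟨radius, rfl⟩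
  obtain ⟨k, hkr⟩ : ∃ k : Nat, (k : Int) = r - 1 := ⟨(r - 1).toNat, by omega⟩
  set C : List (List Int) := [[x + r, y], [x, y + r], [x - r, y], [x, y - r]] with hC
  set f1 : Int → List Int := fun d => [x + r - d, y + d] with hf1
  set f2 : Int → List Int := fun d => [x - d, y + r - d] with hf2
  set f3 : Int → List Int := fun d => [x - r + d, y - d] with hf3
  set f4 : Int → List Int := fun d => [x + d, y - r + d] with hf4
  have memC : ∀ p : List Int, p ∈ C ↔ p = [x + r, y] ∨ p = [x, y + r] ∨ p = [x - r, y] ∨ p = [x, y - r] := by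
    intro p; simp [hC]
  have memSeg : ∀ (f : Int → List Int) (d0 : Int) (m : Nat) (p : List Int),
      p ∈ pvSeg f d0 m ↔ ∃ i : Nat, i < m ∧ p = f (d0 + 1 + i) := by
    intro f d0 m p
    simp [pvSeg, eq_comm]
  -- loop 1
  have h1 : pyWhileA 0 (-1) 1 (r.toNat + 1) 0 C = C ++ pvSeg f1 0 k := by
    refine pyWhileA_spec f1 (x + r) y (-1) 1 0 (by intro d; simp only [hf1, List.cons.injEq, and_true]; exact ⟨by ring, by ring⟩) k C 0 (r.toNat + 1)
      (by simp [hC]) (by simp [hC]) (by simp [hC]) (by omega) ?_ ?_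
    · intro j hj hmem
      rcases List.mem_append.1 hmem with hm | hm
      · rcases (memC _).1 hm with h | h | h | h <;>
          (simp only [hf1] at h; have := List.cons.injEq .. ▸ h; simp at this; omega)
      · obtain ⟨i, hi, he⟩ := (memSeg _ _ _ _).1 hm
        simp only [hf1] at he; simp at he; omega
    · refine List.mem_append.2 (Or.inl ((memC _).2 (Or.inr (Or.inl ?_))))
      simp only [hf1, List.cons.injEq, and_true]; constructor <;> omega
  -- loop 2
  have h2 : pyWhileA 1 (-1) (-1) (r.toNat + 1) 0 (C ++ pvSeg f1 0 k)
      = (C ++ pvSeg f1 0 k) ++ pvSeg f2 0 k := by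
    refine pyWhileA_spec f2 x (y + r) (-1) (-1) 1 (by intro d; simp only [hf2, List.cons.injEq, and_true]; exact ⟨by ring, by ring⟩) k _ 0 (r.toNat + 1)
      (by simp [hC]) (by simp [hC]) (by simp [hC]) (by omega) ?_ ?_
    · intro j hj hmem
      rcases List.mem_append.1 hmem with hm | hm
      · rcases List.mem_append.1 hm with hm' | hm'
        · rcases (memC _).1 hm' with h | h | h | h <;>
            (simp only [hf2] at h; simp at h; omega)
        · obtain ⟨i, hi, he⟩ := (memSeg _ _ _ _).1 hm'
          simp only [hf1, hf2] at he; simp at he; omega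
      · obtain ⟨i, hi, he⟩ := (memSeg _ _ _ _).1 hm
        simp only [hf2] at he; simp at he; omega
    · refine List.mem_append.2 (Or.inl (List.mem_append.2 (Or.inl ((memC _).2 (Or.inr (Or.inr (Or.inl ?_)))))))
      simp only [hf2, List.cons.injEq, and_true]; constructor <;> omega
  -- loop 3
  have h3 : pyWhileA 2 1 (-1) (r.toNat + 1) 0 ((C ++ pvSeg f1 0 k) ++ pvSeg f2 0 k)
      = ((C ++ pvSeg f1 0 k) ++ pvSeg f2 0 k) ++ pvSeg f3 0 k := by
    refine pyWhileA_spec f3 (x - r) y 1 (-1) 2 (by intro d; simp only [hf3, List.cons.injEq, and_true]; exact ⟨by ring, by ring⟩) k _ 0 (r.toNat + 1)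
      (by simp [hC]) (by simp [hC]) (by simp [hC]) (by omega) ?_ ?_
    · intro j hj hmem
      rcases List.mem_append.1 hmem with hm | hm
      · rcases List.mem_append.1 hm with hm' | hm'
        · rcases List.mem_append.1 hm' with hm'' | hm''
          · rcases (memC _).1 hm'' with h | h | h | h <;>
              (simp only [hf3] at h; simp at h; omega)
          · obtain ⟨i, hi, he⟩ := (memSeg _ _ _ _).1 hm''
            simp only [hf1, hf3] at he; simp at he; omega
        · obtain ⟨i, hi, he⟩ := (memSeg _ _ _ _).1 hm'
          simp only [hf2, hf3] at he; simp at he; omega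
      · obtain ⟨i, hi, he⟩ := (memSeg _ _ _ _).1 hm
        simp only [hf3] at he; simp at he; omega
    · refine List.mem_append.2 (Or.inl (List.mem_append.2 (Or.inl (List.mem_append.2 (Or.inl ((memC _).2 (Or.inr (Or.inr (Or.inr ?_))))))))) 
      simp only [hf3, List.cons.injEq, and_true]; constructor <;> omega
  -- loop 4
  have h4 : pyWhileA 3 1 1 (r.toNat + 1) 0 (((C ++ pvSeg f1 0 k) ++ pvSeg f2 0 k) ++ pvSeg f3 0 k)
      = (((C ++ pvSeg f1 0 k) ++ pvSeg f2 0 k) ++ pvSeg f3 0 k) ++ pvSeg f4 0 k := by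
    refine pyWhileA_spec f4 x (y - r) 1 1 3 (by intro d; simp only [hf4, List.cons.injEq, and_true]; exact ⟨by ring, by ring⟩) k _ 0 (r.toNat + 1)
      (by simp [hC]) (by simp [hC]) (by simp [hC]) (by omega) ?_ ?_
    · intro j hj hmem
      rcases List.mem_append.1 hmem with hm | hm
      · rcases List.mem_append.1 hm with hm' | hm'
        · rcases List.mem_append.1 hm' with hm'' | hm''
          · rcases List.mem_append.1 hm'' with hm3 | hm3
            · rcases (memC _).1 hm3 with h | h | h | h <;>
                (simp only [hf4] at h; simp at h; omega)
            · obtain ⟨i, hi, he⟩ := (memSeg _ _ _ _).1 hm3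
              simp only [hf1, hf4] at he; simp at he; omega
          · obtain ⟨i, hi, he⟩ := (memSeg _ _ _ _).1 hm''
            simp only [hf2, hf4] at he; simp at he; omega
        · obtain ⟨i, hi, he⟩ := (memSeg _ _ _ _).1 hm'
          simp only [hf3, hf4] at he; simp at he; omega
      · obtain ⟨i, hi, he⟩ := (memSeg _ _ _ _).1 hm
        simp only [hf4] at he; simp at he; omega
    · refine List.mem_append.2 (Or.inl (List.mem_append.2 (Or.inl (List.mem_append.2 (Or.inl (List.mem_append.2 (Or.inl ((memC _).2 (Or.inl ?_)))))))))
      simp only [hf4, List.cons.injEq, and_true]; constructor <;> omega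
  have hkt : (r - 1).toNat = k := by omega
  simp only [← hC, ← hf1, ← hf2, ← hf3, ← hf4]
  rw [h1, h2, h3, h4, pvSeg_eq_pyRange_map f1 r hr, pvSeg_eq_pyRange_map f2 r hr,
    pvSeg_eq_pyRange_map f3 r hr, pvSeg_eq_pyRange_map f4 r hr, hkt]
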